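-- pv_equiv track=rewrite | github.com/SpectreDeath/Semantic-Memory-Engine | extensions/ext_archival_diff/scout.py | _is_soft_404
-- ===== SOURCE A (Python) =====
-- def _is_soft_404(content: str) -> bool:
--     """
--     Detects common 'Page Not Found' or 'Redirect' patterns in HTML.
--     """
--     soft_404_indicators = [
--         "404 - File or directory not found",
--         "Page not found",
--         "The requested page could not be found",
--         "This page has moved",
--         "Access Denied",
--         "window.location.replace",
--         "http-equiv=\"refresh\""
--     ]
--
--     lower_content = content.lower()
--     for indicator in soft_404_indicators:
--         if indicator.lower() in lower_content:
--             return True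
--     return False
-- ===== SOURCE B (Python) =====
-- import re
--
-- _SOFT_404_PATTERN = re.compile("|".join(
--     re.escape(indicator)
--     for indicator in (
--         "404 - file or directory not found",
--         "page not found",
--         "the requested page could not be found",
--         "this page has moved",
--         "access denied",
--         "window.location.replace",
--         'http-equiv="refresh"',
--     )
-- ))
--
--
-- def _is_soft_404(content: str) -> bool:
--     return _SOFT_404_PATTERN.search(content.lower()) is not None
-- ===== Notes on version B (the rewrite author's own statement) =====
-- stated objective: idiomatic
-- what changed: B precompiles one regex alternation of the escaped, pre-lowercased indicators and answers with a single search over the lowercased content, instead of A's loop of seven independent substring searches with early return.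
import Mathlib
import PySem

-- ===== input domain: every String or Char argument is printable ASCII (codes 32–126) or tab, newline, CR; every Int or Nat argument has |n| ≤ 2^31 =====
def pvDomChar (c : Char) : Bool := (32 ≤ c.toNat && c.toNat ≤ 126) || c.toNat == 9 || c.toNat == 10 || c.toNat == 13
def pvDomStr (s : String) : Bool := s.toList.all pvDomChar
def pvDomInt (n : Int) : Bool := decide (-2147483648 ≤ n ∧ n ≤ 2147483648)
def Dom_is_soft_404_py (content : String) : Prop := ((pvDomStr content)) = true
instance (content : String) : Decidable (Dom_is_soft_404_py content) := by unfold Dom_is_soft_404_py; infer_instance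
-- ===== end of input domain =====

-- B replaces A's loop of seven independent substring searches by one precompiled regex
-- (the escaped, pre-lowercased indicators joined with '|') searched once over the
-- lowercased content (objective: idiomatic; same cost class).

-- ===== PORT A =====
-- A's indicator list, verbatim
def soft404IndicatorsA : List String :=
  ["404 - File or directory not found",
   "Page not found",
   "The requested page could not be found",
   "This page has moved",
   "Access Denied",
   "window.location.replace",
   "http-equiv=\"refresh\""]

-- A's for-loop with early return: recursion over the indicator list
def soft404LoopA (inds : List String) (lowerContent : String) : Bool :=
  match inds with
  | [] => false
  | ind :: rest =>
    if PySem.Str.isIn (PySem.Str.lower ind) lowerContent then true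
    else soft404LoopA rest lowerContent

def is_soft_404_py (content : String) : Bool :=
  soft404LoopA soft404IndicatorsA (PySem.Str.lower content)

-- ===== PORT B =====
-- B's compiled pattern: since every branch is re.escape-d, the regex is exactly an
-- alternation of literal strings; we represent it as the list of its alternatives
-- (as char lists — the engine works character by character).
def soft404PatternB : List (List Char) :=
  ["404 - file or directory not found".toList,
   "page not found".toList,
   "the requested page could not be found".toList,
   "this page has moved".toList,
   "access denied".toList,
   "window.location.replace".toList,
   "http-equiv=\"refresh\"".toList]

-- re.search of an alternation of literals, ported exactly: the engine tries each
-- position of the subject left to right, and at each position tries the alternatives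
-- in pattern order; 'search(...) is not None' is whether any attempt matches.
def regexSearchAlt (alts : List (List Char)) : List Char → Bool
  | [] => alts.any (fun p => PySem.Chars.startswith [] p)
  | c :: t => alts.any (fun p => PySem.Chars.startswith (c :: t) p) || regexSearchAlt alts t

def is_soft_404_py_alt (content : String) : Bool :=
  regexSearchAlt soft404PatternB (PySem.Chars.lower content.toList)

-- ===== PRECONDITION & SPEC =====
def Spec_is_soft_404_py (content : String) (out : Bool) : Prop := out = is_soft_404_py_alt content
instance (content : String) (out : Bool) : Decidable (Spec_is_soft_404_py content out) := by unfold Spec_is_soft_404_py; infer_instance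

-- ===== CLAIM (what is proved, stated in full; the proofs are below) =====
def Claim_equal_is_soft_404_py : Prop := ∀ (content : String), Dom_is_soft_404_py content → Spec_is_soft_404_py content (is_soft_404_py content)

-- ===== LEMMAS AND PROOFS =====

-- B's position-by-position search finds an alternative iff some alternative is an infix (Python 'in')
theorem regexSearchAlt_eq_any_isIn (alts : List (List Char)) (s : List Char) :
    regexSearchAlt alts s = alts.any (fun p => PySem.Chars.isIn p s) := by
  induction s with
  | nil =>
    apply Bool.eq_iff_iff.mpr
    simp [regexSearchAlt, List.any_eq_true, PySem.Chars.startswith_iff, PySem.Chars.isIn_iff_infix]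
  | cons c t ih =>
    apply Bool.eq_iff_iff.mpr
    simp only [regexSearchAlt, ih, Bool.or_eq_true, List.any_eq_true,
      PySem.Chars.startswith_iff, PySem.Chars.isIn_iff_infix, List.infix_cons_iff]
    constructor
    · rintro (⟨x, hx, hp⟩ | ⟨x, hx, hq⟩)
      exacts [⟨x, hx, Or.inl hp⟩, ⟨x, hx, Or.inr hq⟩]
    · rintro ⟨x, hx, hp | hq⟩
      exacts [Or.inl ⟨x, hx, hp⟩, Or.inr ⟨x, hx, hq⟩]

-- A's early-return loop is 'any indicator (lowered) is in lowerContent'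
theorem soft404LoopA_eq_any (inds : List String) (lc : String) :
    soft404LoopA inds lc = inds.any (fun i => PySem.Str.isIn (PySem.Str.lower i) lc) := by
  induction inds with
  | nil => rfl
  | cons i rest ih => simp [soft404LoopA, ih]

-- B's literal alternatives are A's indicators, lowercased (checks the hand-lowercased literals)
theorem soft404PatternB_eq :
    soft404PatternB = soft404IndicatorsA.map (fun i => PySem.Chars.lower i.toList) := by
  decide

-- ===== VERDICT (by name: the statement is the Claim_ definition above) =====
theorem is_soft_404_py_spec : Claim_equal_is_soft_404_py := by
  intro content _
  unfold Spec_is_soft_404_py is_soft_404_py is_soft_404_py_alt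
  rw [soft404LoopA_eq_any, regexSearchAlt_eq_any_isIn, soft404PatternB_eq, List.any_map]
  congr 1
  funext i
  simp [PySem.Str.isIn_eq, PySem.Str.toList_lower]
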